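-- pv_equiv track=rewrite | github.com/rhejos/rhejos | ai_humanizer.py | _reduce_politeness
-- ===== SOURCE A (Python) =====
-- def _reduce_politeness(text: str) -> str:
--     """Reduce excessive politeness that AI often exhibits."""
--     overly_polite = [
--         'I would like to',
--         'I would be happy to',
--         'I would be glad to',
--         'If you would like',
--         'Please feel free to',
--         'I hope this helps',
--         'I hope this information is helpful'
--     ]
--
--     replacements = [
--         'I want to',
--         'I can',
--         'I can',
--         'If you want',
--         'Feel free to',
--         '',
--         ''
--     ]
--
--     for i, phrase in enumerate(overly_polite):
--         text = text.replace(phrase, replacements[i])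
--
--     return text
-- ===== SOURCE B (Python) =====
-- _RULES = [
--     ('I would like to', 'I want to'),
--     ('I would be happy to', 'I can'),
--     ('I would be glad to', 'I can'),
--     ('If you would like', 'If you want'),
--     ('Please feel free to', 'Feel free to'),
--     ('I hope this helps', ''),
--     ('I hope this information is helpful', ''),
-- ]
--
--
-- def _apply(rules, text):
--     # recurse over the rule list; each rule is applied by splitting the text
--     # into the segments between occurrences of the phrase and joining those
--     # segments with the replacement (r.join(t.split(p)) == t.replace(p, r)).
--     if not rules:
--         return text
--     (phrase, repl), rest = rules[0], rules[1:]
--     return _apply(rest, repl.join(text.split(phrase)))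
--
--
-- def _reduce_politeness(text: str) -> str:
--     return _apply(_RULES, text)
-- ===== Notes on version B (the rewrite author's own statement) =====
-- stated objective: alternative
-- what changed: A iterates with enumerate over two parallel lists and calls str.replace seven times; B recurses over a single (phrase, replacement) rule list and never calls replace: each rule decomposes the text into the list of segments between occurrences via str.split and reassembles them with the replacement as separator (r.join(t.split(p)) == t.replace(p, r) for nonempty p).
import Mathlib
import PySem

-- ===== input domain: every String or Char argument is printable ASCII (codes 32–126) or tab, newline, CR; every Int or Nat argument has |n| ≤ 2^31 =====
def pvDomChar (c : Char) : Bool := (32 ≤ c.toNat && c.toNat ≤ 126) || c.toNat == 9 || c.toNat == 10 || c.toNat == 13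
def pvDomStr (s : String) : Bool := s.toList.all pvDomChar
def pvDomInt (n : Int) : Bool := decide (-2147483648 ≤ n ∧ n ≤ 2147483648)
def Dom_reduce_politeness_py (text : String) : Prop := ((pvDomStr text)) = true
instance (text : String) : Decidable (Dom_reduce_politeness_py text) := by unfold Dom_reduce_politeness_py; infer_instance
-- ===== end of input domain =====

-- B replaces the enumerate-indexed loop of seven str.replace calls by a recursion over one
-- (phrase, replacement) rule list that splits the text into segments between occurrences and
-- joins them with the replacement (objective: alternative; same cost).

-- ===== PORT A =====
def pvOverlyPolite : List String :=
  ["I would like to", "I would be happy to", "I would be glad to", "If you would like",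
   "Please feel free to", "I hope this helps", "I hope this information is helpful"]

def pvReplacements : List String :=
  ["I want to", "I can", "I can", "If you want", "Feel free to", "", ""]

-- 'for i, phrase in enumerate(overly_polite): text = text.replace(phrase, replacements[i])'
-- replacements[i] is always in range (both literal lists have 7 elements), so pyGetD's default "" is never used.
def reduce_politeness_py (text : String) : String :=
  (PySem.List.enumerate pvOverlyPolite).foldl
    (fun t ip => PySem.Str.replace t ip.2 (PySem.List.pyGetD pvReplacements ip.1 ""))
    text

-- ===== PORT B =====
def pvRules : List (List Char × List Char) :=
  [("I would like to".toList, "I want to".toList),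
   ("I would be happy to".toList, "I can".toList),
   ("I would be glad to".toList, "I can".toList),
   ("If you would like".toList, "If you want".toList),
   ("Please feel free to".toList, "Feel free to".toList),
   ("I hope this helps".toList, "".toList),
   ("I hope this information is helpful".toList, "".toList)]

-- Source B's _apply: recursion over the rule list; repl.join(text.split(phrase)) per rule.
-- PySem.Chars.splitOn / PySem.Chars.join are exactly Python's str.split(sep) (sep ≠ '', true
-- for every rule phrase) and sep.join, stated over List Char.
def pvApply : List (List Char × List Char) → List Char → List Char
  | [], cs => cs
  | (p, r) :: rest, cs => pvApply rest (PySem.Chars.join r (PySem.Chars.splitOn cs p))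

def reduce_politeness_py_alt (text : String) : String :=
  String.ofList (pvApply pvRules text.toList)

-- ===== PRECONDITION & SPEC =====
def Spec_reduce_politeness_py (text : String) (out : String) : Prop := out = reduce_politeness_py_alt text
instance (text : String) (out : String) : Decidable (Spec_reduce_politeness_py text out) := by unfold Spec_reduce_politeness_py; infer_instance

-- ===== CLAIM (what is proved, stated in full; the proofs are below) =====
def Claim_equal_reduce_politeness_py : Prop := ∀ (text : String), Dom_reduce_politeness_py text → Spec_reduce_politeness_py text (reduce_politeness_py text)

-- ===== LEMMAS AND PROOFS =====

-- A clean structural form of splitOn.go (no accumulators).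
def pvSp (sep : List Char) : Nat → List Char → List (List Char)
  | 0, l => [l]
  | _ + 1, [] => [[]]
  | fuel + 1, c :: t =>
      if sep.isPrefixOf (c :: t) then [] :: pvSp sep fuel (List.drop sep.length (c :: t))
      else (pvSp sep fuel t).modifyHead (c :: ·)

-- A clean structural form of replace.go (no accumulator).
def pvScan (phrase repl : List Char) : Nat → List Char → List Char
  | 0, l => l
  | _ + 1, [] => []
  | fuel + 1, c :: t =>
      if phrase.isPrefixOf (c :: t) then repl ++ pvScan phrase repl fuel (List.drop phrase.length (c :: t))
      else c :: pvScan phrase repl fuel t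

theorem pv_modifyHead_id {α : Type} (l : List α) : List.modifyHead (fun x => x) l = l := by
  cases l <;> simp

theorem pv_modifyHead_ne_nil {α : Type} (f : α → α) (l : List α) (h : l ≠ []) :
    List.modifyHead f l ≠ [] := by
  cases l <;> simp_all

theorem pvSp_ne_nil (sep : List Char) (fuel : Nat) (l : List Char) : pvSp sep fuel l ≠ [] := by
  induction fuel generalizing l with
  | zero => simp [pvSp]
  | succ n ih =>
      cases l with
      | nil => simp [pvSp]
      | cons c t =>
          by_cases h : sep.isPrefixOf (c :: t)
          · simp [pvSp, h]
          · simpa [pvSp, h] using pv_modifyHead_ne_nil (c :: ·) _ (ih t)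

theorem pv_go_eq_sp (sep : List Char) :
    ∀ (fuel : Nat) (l cur : List Char) (acc : List (List Char)),
      PySem.Chars.splitOn.go sep fuel l cur acc =
        acc.reverse ++ (pvSp sep fuel l).modifyHead (cur.reverse ++ ·) := by
  intro fuel
  induction fuel with
  | zero => intro l cur acc; simp [PySem.Chars.splitOn.go, pvSp]
  | succ n ih =>
      intro l cur acc
      cases l with
      | nil => simp [PySem.Chars.splitOn.go, pvSp]
      | cons c t =>
          by_cases h : sep.isPrefixOf (c :: t)
          · simp [PySem.Chars.splitOn.go, pvSp, h, ih, pv_modifyHead_id]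
          · simp only [PySem.Chars.splitOn.go, pvSp, h, if_neg, Bool.false_eq_true, ite_false, ih]
            congr 1
            rw [List.modifyHead_modifyHead]
            congr 1
            funext x
            simp
  
theorem pv_join_sp_eq_scan (sep new : List Char) :
    ∀ (fuel : Nat) (l : List Char),
      PySem.Chars.join new (pvSp sep fuel l) = pvScan sep new fuel l := by
  intro fuel
  induction fuel with
  | zero => intro l; simp [pvSp, pvScan, PySem.Chars.join, List.intercalate]
  | succ n ih =>
      intro l
      cases l with
      | nil => simp [pvSp, pvScan, PySem.Chars.join, List.intercalate]
      | cons c t =>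
          by_cases h : sep.isPrefixOf (c :: t)
          · have hne := pvSp_ne_nil sep n (List.drop sep.length (c :: t))
            obtain ⟨x, xs, hx⟩ := List.exists_cons_of_ne_nil hne
            simp [pvSp, pvScan, h, ← ih, hx, PySem.Chars.join_cons_cons]
          · have hne := pvSp_ne_nil sep n t
            obtain ⟨x, xs, hx⟩ := List.exists_cons_of_ne_nil hne
            cases xs with
            | nil => simp [pvSp, pvScan, h, ← ih, hx, PySem.Chars.join, List.intercalate]
            | cons y ys =>
                simp [pvSp, pvScan, h, ← ih, hx, PySem.Chars.join_cons_cons]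

-- replace.go with accumulator is pvScan with the accumulator un-reversed in front.
theorem pv_go_eq_scan (old new : List Char) :
    ∀ (fuel : Nat) (l acc : List Char),
      PySem.Chars.replace.go old new fuel l acc = acc.reverse ++ pvScan old new fuel l := by
  intro fuel
  induction fuel with
  | zero => intro l acc; simp [PySem.Chars.replace.go, pvScan]
  | succ n ih =>
      intro l acc
      cases l with
      | nil => simp [PySem.Chars.replace.go, pvScan]
      | cons c t =>
          by_cases h : old.isPrefixOf (c :: t)
          · simp [PySem.Chars.replace.go, pvScan, h, ih]
          · simp [PySem.Chars.replace.go, pvScan, h, ih]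

-- pvScan ignores extra fuel (for a nonempty phrase).
theorem pvScan_fuel (p r : List Char) (hp : p ≠ []) :
    ∀ (fuel₁ fuel₂ : Nat) (l : List Char), l.length ≤ fuel₁ → l.length ≤ fuel₂ →
      pvScan p r fuel₁ l = pvScan p r fuel₂ l := by
  intro fuel₁
  induction fuel₁ with
  | zero =>
      intro fuel₂ l hl _
      have : l = [] := List.eq_nil_of_length_eq_zero (Nat.le_zero.mp hl)
      cases fuel₂ <;> simp [this, pvScan]
  | succ n ih =>
      intro fuel₂ l hl₁ hl₂
      cases l with
      | nil => cases fuel₂ <;> simp [pvScan]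
      | cons c t =>
          cases fuel₂ with
          | zero => simp at hl₂
          | succ m =>
              by_cases h : p.isPrefixOf (c :: t)
              · have hplen : 1 ≤ p.length := List.length_pos_iff.mpr hp
                have hn : (List.drop p.length (c :: t)).length ≤ n := by
                  simp only [List.length_drop, List.length_cons]
                  simp only [List.length_cons] at hl₁
                  omega
                have hm : (List.drop p.length (c :: t)).length ≤ m := by
                  simp only [List.length_drop, List.length_cons]
                  simp only [List.length_cons] at hl₂
                  omega
                simp [pvScan, h, ih m _ hn hm]
              · have hn : t.length ≤ n := by simp only [List.length_cons] at hl₁; omega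
                have hm : t.length ≤ m := by simp only [List.length_cons] at hl₂; omega
                simp [pvScan, h, ih m t hn hm]

-- split(sep) then join(repl) IS replace(sep, repl), for a nonempty sep.
theorem pv_join_split_eq_replace (s sep new : List Char) (h : sep ≠ []) :
    PySem.Chars.join new (PySem.Chars.splitOn s sep) = PySem.Chars.replace s sep new := by
  have h1 : PySem.Chars.splitOn s sep = pvSp sep (s.length + 1) s := by
    simp [PySem.Chars.splitOn, pv_go_eq_sp, pv_modifyHead_id]
  have h2 : PySem.Chars.replace s sep new = pvScan sep new s.length s := by
    simp [PySem.Chars.replace, List.isEmpty_iff, h, pv_go_eq_scan]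
  rw [h1, h2, pv_join_sp_eq_scan]
  exact pvScan_fuel sep new h _ _ s (Nat.le_succ _) (le_refl _)

-- Str-level restatement of the rule step used by the final proof.
theorem pv_str_replace_eq_split (s old new : String) (h : old.toList ≠ []) :
    PySem.Str.replace s old new =
      String.ofList (PySem.Chars.join new.toList (PySem.Chars.splitOn s.toList old.toList)) := by
  rw [pv_join_split_eq_replace _ _ _ h, PySem.Str.replace]

-- ===== VERDICT (by name: the statement is the Claim_ definition above) =====
theorem reduce_politeness_py_spec : Claim_equal_reduce_politeness_py := by
  unfold Claim_equal_reduce_politeness_py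
  intro text _
  unfold Spec_reduce_politeness_py reduce_politeness_py reduce_politeness_py_alt
  simp only [pvOverlyPolite, pvRules, PySem.List.enumerate_cons, PySem.List.enumerate_nil,
    List.foldl, pvApply]
  norm_num [pvReplacements, PySem.List.pyGetD, PySem.List.pyGet?, PySem.List.pyIdx?]
  rw [pv_str_replace_eq_split _ _ _ (by decide)]
  rw [pv_str_replace_eq_split _ _ _ (by decide)]
  rw [pv_str_replace_eq_split _ _ _ (by decide)]
  rw [pv_str_replace_eq_split _ _ _ (by decide)]
  rw [pv_str_replace_eq_split _ _ _ (by decide)]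
  rw [pv_str_replace_eq_split _ _ _ (by decide)]
  rw [pv_str_replace_eq_split _ _ _ (by decide)]
  simp [String.toList_ofList]
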